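-- pv_equiv track=rewrite | github.com/bakzs/telbot | PHONE - Function form - New error handling function - for Bak.py | set_directions
-- ===== SOURCE A (Python) =====
-- def set_directions(directionstorage):
--     print (directionstorage[0]) #This will print the the following: 'Total distance is x km.' (x = distance)
--     counter = 0
--     directionstoprint = ''      #directionstoprint is a string that will contain all the directions that will be sent to the user
--     #[6:] because directions start from the 6th element in the list (counting from 0)
--     for direction in directionstorage[6:]:
--         counter += 1
--         directionstoprint += direction
--         directionstoprint += ' '
--         if counter == 4:
--             directionstoprint += '\n'
--             counter = 0
--     print ("this is followed by directionstoprint")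
--     return directionstoprint
-- ===== SOURCE B (Python) =====
-- def set_directions(directionstorage):
--     print(directionstorage[0])  # same side effect as A
--     rest = directionstorage[6:]
--     pieces = []
--     for i in range(0, len(rest), 4):
--         chunk = rest[i:i + 4]
--         pieces.append(''.join(d + ' ' for d in chunk))
--         if len(chunk) == 4:
--             pieces.append('\n')
--     print("this is followed by directionstoprint")
--     return ''.join(pieces)
-- ===== Notes on version B (the rewrite author's own statement) =====
-- stated objective: alternative
-- what changed: Replaces the per-element counter loop (counter reset at 4) with iteration over 4-element chunks, joining each chunk at once and appending the newline exactly when the chunk is full; same prints, same return value.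
import Mathlib
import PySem

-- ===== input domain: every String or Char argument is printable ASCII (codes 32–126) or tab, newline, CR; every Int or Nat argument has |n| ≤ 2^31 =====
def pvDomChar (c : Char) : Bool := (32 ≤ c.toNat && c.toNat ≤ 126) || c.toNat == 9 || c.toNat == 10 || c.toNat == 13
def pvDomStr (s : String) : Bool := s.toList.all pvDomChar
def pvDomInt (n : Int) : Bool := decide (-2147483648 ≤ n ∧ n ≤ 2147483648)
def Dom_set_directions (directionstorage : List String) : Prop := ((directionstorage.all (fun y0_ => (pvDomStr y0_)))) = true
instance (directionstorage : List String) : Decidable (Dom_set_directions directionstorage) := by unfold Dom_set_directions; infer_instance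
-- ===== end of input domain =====

-- B replaces A's per-element counter loop with iteration over 4-element chunks (alternative
-- decomposition, same cost). Equivalence is about the RETURN value only: both Pythons also
-- print directionstorage[0] and a fixed message; those side effects are identical and unmodelled.


-- ===== PORT A =====
-- A's for-loop: state is (counter, directionstoprint); counter resets after every 4th element.
def setDirsLoopA : List String → Int → String → String
  | [], _, acc => acc
  | d :: rest, counter, acc =>
    let counter' := counter + 1
    let acc' := (acc ++ d) ++ " "
    if counter' = 4 then setDirsLoopA rest 0 (acc' ++ "\n")
    else setDirsLoopA rest counter' acc'

def set_directions (directionstorage : List String) : String :=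
  setDirsLoopA (PySem.List.slice directionstorage (some 6) none) 0 ""

-- ===== PORT B =====
-- ''.join(d + ' ' for d in chunk)
def setDirsJoinChunk (chunk : List String) : String :=
  String.join (chunk.map (fun d => d ++ " "))

-- B's chunk loop: take the next 4 directions, join them, newline iff the chunk is full.
def setDirsChunksB : List String → String
  | [] => ""
  | l@(_ :: _) =>
    let chunk := l.take 4
    (setDirsJoinChunk chunk ++ (if chunk.length = 4 then "\n" else "")) ++ setDirsChunksB (l.drop 4)
  termination_by l => l.length
  decreasing_by subst_vars; simp

def set_directions_alt (directionstorage : List String) : String :=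
  setDirsChunksB (PySem.List.slice directionstorage (some 6) none)

-- ===== PRECONDITION & SPEC =====
-- Pre_ excludes only the empty list, on which A's 'print(directionstorage[0])' raises IndexError.
def Pre_set_directions (directionstorage : List String) : Prop := directionstorage ≠ []
instance (directionstorage : List String) : Decidable (Pre_set_directions directionstorage) := by unfold Pre_set_directions; infer_instance
def pvWitness_set_directions : List String := ["Total distance is 3 km."]

def Spec_set_directions (directionstorage : List String) (out : String) : Prop := out = set_directions_alt directionstorage
instance (directionstorage : List String) (out : String) : Decidable (Spec_set_directions directionstorage out) := by unfold Spec_set_directions; infer_instance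

-- ===== CLAIM (what is proved, stated in full; the proofs are below) =====
def Claim_equal_set_directions : Prop := ∀ (directionstorage : List String), Dom_set_directions directionstorage → Pre_set_directions directionstorage → Spec_set_directions directionstorage (set_directions directionstorage)

-- ===== LEMMAS AND PROOFS =====
theorem chunksB_nil : setDirsChunksB [] = "" := by rw [setDirsChunksB]

theorem chunksB_cons4 (a b c d : String) (rest : List String) :
    setDirsChunksB (a :: b :: c :: d :: rest) =
      (a ++ " " ++ (b ++ " " ++ (c ++ " " ++ (d ++ " "))) ++ "\n") ++ setDirsChunksB rest := by
  rw [setDirsChunksB]; simp [setDirsJoinChunk, String.join, String.append_assoc]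

theorem setDirsLoop_eq_chunks (l : List String) (acc : String) :
    setDirsLoopA l 0 acc = acc ++ setDirsChunksB l := by
  match l with
  | [] => simp [setDirsLoopA, chunksB_nil]
  | [a] =>
    rw [setDirsChunksB]
    simp [setDirsLoopA, setDirsJoinChunk, String.join, chunksB_nil, String.append_assoc]
  | [a, b] =>
    rw [setDirsChunksB]
    simp [setDirsLoopA, setDirsJoinChunk, String.join, chunksB_nil, String.append_assoc]
  | [a, b, c] =>
    rw [setDirsChunksB]
    simp [setDirsLoopA, setDirsJoinChunk, String.join, chunksB_nil, String.append_assoc]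
  | a :: b :: c :: d :: rest =>
    have ih := setDirsLoop_eq_chunks rest
        ((((((((acc ++ a) ++ " ") ++ b) ++ " ") ++ c) ++ " ") ++ d) ++ " " ++ "\n")
    simp only [setDirsLoopA]
    norm_num
    rw [ih, chunksB_cons4]
    simp [String.append_assoc]
  termination_by l.length
  decreasing_by simp; omega

-- ===== VERDICT (by name: the statement is the Claim_ definition above) =====
theorem set_directions_spec : Claim_equal_set_directions := by
  intro ds _ _
  unfold Spec_set_directions set_directions set_directions_alt
  simpa using setDirsLoop_eq_chunks (PySem.List.slice ds (some 6) none) ""
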